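-- pv_equiv track=rewrite | github.com/jyztintan/leetcode | Python/find_power_ksize_subarr.py | resultsArray
-- ===== SOURCE A (Python) =====
-- def resultsArray(nums, k: int):
--     if k == 1:
--         return nums
--     n = len(nums)
--     ans = []
--
--     # Get initial window
--     window_count = 1
--     for i in range(1, k):
--         if nums[i] == nums[i - 1] + 1:
--             window_count += 1
--     if window_count == k:
--         ans.append(nums[i])
--     else:
--         ans.append(-1)
--
--     # Slide the window and modify the count of consecutive numbers within the window by checking front and back
--     for left in range(1, n - k + 1):
--         right = left + k - 1
--         if nums[left] == nums[left - 1] + 1: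
--             window_count -= 1
--         if nums[right] == nums[right - 1] + 1:
--             window_count += 1
--
--         # If all consecutive, then add the right-most (highest) number, otherwise -1
--         if window_count == k:
--             ans.append(nums[right])
--         else:
--             ans.append(-1)
--
--     return ans
--
-- nums = [1,2,3,4,3,2,5]
-- ===== SOURCE B (Python) =====
-- def resultsArray(nums, k: int):
--     if k == 1:
--         return nums
--     n = len(nums)
--     # run[i] = length of the maximal consecutive (+1) streak ending at i
--     run = [1] * n
--     for i in range(1, n):
--         if nums[i] == nums[i - 1] + 1:
--             run[i] = run[i - 1] + 1
--     # one answer per window end r = k-1 .. n-1; the first window always exists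
--     ans = [nums[k - 1] if run[k - 1] >= k else -1]
--     for r in range(k, n):
--         ans.append(nums[r] if run[r] >= k else -1)
--     return ans
-- ===== Notes on version B (the rewrite author's own statement) =====
-- stated objective: alternative
-- what changed: Replaces A's incrementally maintained sliding-window pair counter with a precomputed run-length (streak) table plus one independent scan over window ends.
-- outside the precondition, e.g. on resultsArray([], 0): A returns [-1], B raises IndexError
import Mathlib
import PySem

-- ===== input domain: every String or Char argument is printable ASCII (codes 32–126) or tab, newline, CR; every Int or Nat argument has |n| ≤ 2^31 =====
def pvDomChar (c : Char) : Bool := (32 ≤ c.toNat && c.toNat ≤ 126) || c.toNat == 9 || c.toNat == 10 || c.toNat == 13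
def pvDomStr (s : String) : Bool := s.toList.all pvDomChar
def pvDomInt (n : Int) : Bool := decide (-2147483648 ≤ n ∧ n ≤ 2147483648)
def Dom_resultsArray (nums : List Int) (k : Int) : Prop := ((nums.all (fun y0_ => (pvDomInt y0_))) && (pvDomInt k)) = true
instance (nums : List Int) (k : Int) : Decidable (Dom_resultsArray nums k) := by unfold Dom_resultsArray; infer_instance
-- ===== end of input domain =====

-- B replaces A's incrementally maintained sliding-window counter with a precomputed
-- run-length (streak) table plus one independent scan over window ends (alternative decomposition, same O(n) cost).

-- ===== PORT A =====
-- literal transliteration of A; nums[i] → PySem.List.pyGetD (all indices in range under Pre_)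
def resultsArray (nums : List Int) (k : Int) : List Int :=
  if k = 1 then nums
  else
    let n : Int := nums.length
    -- Get initial window
    let wc : Int := (PySem.List.pyRange 1 k 1).foldl
      (fun wc i => if PySem.List.pyGetD nums i 0 = PySem.List.pyGetD nums (i - 1) 0 + 1 then wc + 1 else wc) 1
    -- after the loop, i = k - 1 (k ≥ 2 under Pre_)
    let ans : List Int := if wc = k then [PySem.List.pyGetD nums (k - 1) 0] else [-1]
    -- Slide the window
    ((PySem.List.pyRange 1 (n - k + 1) 1).foldl
      (fun (st : List Int × Int) left =>
        let right := left + k - 1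
        let wc1 := if PySem.List.pyGetD nums left 0 = PySem.List.pyGetD nums (left - 1) 0 + 1 then st.2 - 1 else st.2
        let wc2 := if PySem.List.pyGetD nums right 0 = PySem.List.pyGetD nums (right - 1) 0 + 1 then wc1 + 1 else wc1
        (st.1 ++ [if wc2 = k then PySem.List.pyGetD nums right 0 else -1], wc2))
      (ans, wc)).1

-- ===== PORT B =====
-- literal transliteration of Source B: run-length table, then one scan over window ends
def resultsArray_alt (nums : List Int) (k : Int) : List Int :=
  if k = 1 then nums
  else
    let n : Int := nums.length
    let run : List Int := (PySem.List.pyRange 1 n 1).foldl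
      (fun run i =>
        if PySem.List.pyGetD nums i 0 = PySem.List.pyGetD nums (i - 1) 0 + 1
        then PySem.List.pySetD run i (PySem.List.pyGetD run (i - 1) 0 + 1)
        else run)
      (List.replicate nums.length 1)
    let ans : List Int :=
      [if k ≤ PySem.List.pyGetD run (k - 1) 0 then PySem.List.pyGetD nums (k - 1) 0 else -1]
    (PySem.List.pyRange k n 1).foldl
      (fun ans r =>
        ans ++ [if k ≤ PySem.List.pyGetD run r 0 then PySem.List.pyGetD nums r 0 else -1])
      ans

-- ===== PRECONDITION & SPEC =====
-- Pre_ excludes exactly the inputs where A raises (k ≤ 0 or 1 < k with len(nums) < k — IndexError/NameError),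
-- except the single degenerate input (nums=[], k=0), also excluded, where A returns [-1] from leftover loop
-- state (a window of size 0 over an empty list) while B's natural code raises IndexError there.
def Pre_resultsArray (nums : List Int) (k : Int) : Prop :=
  k = 1 ∨ (2 ≤ k ∧ k ≤ (nums.length : Int))
instance (nums : List Int) (k : Int) : Decidable (Pre_resultsArray nums k) := by
  unfold Pre_resultsArray; infer_instance
def pvWitness_resultsArray : List Int × Int := ([1, 2, 3, 4, 3, 2, 5], 3)

def Spec_resultsArray (nums : List Int) (k : Int) (out : List Int) : Prop := out = resultsArray_alt nums k
instance (nums : List Int) (k : Int) (out : List Int) : Decidable (Spec_resultsArray nums k out) := by unfold Spec_resultsArray; infer_instance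

-- ===== CLAIM (what is proved, stated in full; the proofs are below) =====
def Claim_equal_resultsArray : Prop := ∀ (nums : List Int) (k : Int), Dom_resultsArray nums k → Pre_resultsArray nums k → Spec_resultsArray nums k (resultsArray nums k)

-- ===== LEMMAS AND PROOFS =====

-- adjB L j : the pair test "nums[j] == nums[j-1] + 1" at position j ≥ 1
def adjB (L : List Int) (j : Nat) : Bool := L.getD j 0 == L.getD (j - 1) 0 + 1

-- streak length ending at i (the value B's run table holds)
def runN (L : List Int) : Nat → Int
  | 0 => 1
  | i + 1 => if adjB L (i + 1) then runN L i + 1 else 1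

-- A's window counter for the window starting at `left`
def wcW (L : List Int) (K left : Nat) : Int :=
  1 + ((List.range (K - 1)).countP (fun t => adjB L (left + 1 + t)) : Int)

-- the emitted value for the window starting at `left`
def outW (L : List Int) (K left : Nat) : Int :=
  if wcW L K left = (K : Int) then L.getD (left + K - 1) 0 else -1

-- "all pair tests between positions a and b hold"
def allA (L : List Int) (a b : Nat) : Prop := ∀ j, a ≤ j → j ≤ b → adjB L j = true

theorem foldl_fix {β : Type} (f : β → Nat → β) (R : Nat → β) (t : Nat)
    (hf : ∀ u, u < t → f (R u) u = R (u + 1)) : List.foldl f (R 0) (List.range t) = R t := by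
  induction t with
  | zero => simp
  | succ t ih =>
    rw [List.range_succ, List.foldl_append, ih (fun u hu => hf u (by omega))]
    simpa using hf t (by omega)

theorem runN_pos (L : List Int) (r : Nat) : 1 ≤ runN L r := by
  induction r with
  | zero => simp [runN]
  | succ r ih => simp only [runN]; split <;> omega

theorem wcW_eq_iff (L : List Int) (K left : Nat) (hK : 2 ≤ K) :
    wcW L K left = (K : Int) ↔ allA L (left + 1) (left + K - 1) := by
  unfold wcW allA
  have hle := List.countP_le_length (p := fun t => adjB L (left + 1 + t)) (l := List.range (K - 1))
  rw [List.length_range] at hle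
  constructor
  · intro h j hj1 hj2
    have hc : (List.range (K - 1)).countP (fun t => adjB L (left + 1 + t)) = (List.range (K - 1)).length := by
      rw [List.length_range]; omega
    have := List.countP_eq_length.mp hc (j - (left + 1)) (by rw [List.mem_range]; omega)
    simpa [show left + 1 + (j - (left + 1)) = j by omega] using this
  · intro h
    have hc : (List.range (K - 1)).countP (fun t => adjB L (left + 1 + t)) = (List.range (K - 1)).length := by
      apply List.countP_eq_length.mpr
      intro t ht
      rw [List.mem_range] at ht
      exact h (left + 1 + t) (by omega) (by omega)
    rw [hc, List.length_range]; omega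

theorem runN_ge_iff (L : List Int) : ∀ (r m : Nat), m ≤ r + 1 →
    ((m : Int) ≤ runN L r ↔ allA L (r + 2 - m) r) := by
  intro r
  induction r with
  | zero =>
    intro m hm
    interval_cases m
    · constructor
      · intro _ j h1 h2; exact absurd h2 (by omega)
      · intro _; norm_num [runN]
    · constructor
      · intro _ j h1 h2; exact absurd h2 (by omega)
      · intro _; norm_num [runN]
  | succ r ih =>
    intro m hm
    match m with
    | 0 =>
      constructor
      · intro _ j h1 h2; exact absurd h2 (by omega)
      · intro _; exact le_trans (by norm_num) (runN_pos L (r + 1))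
    | 1 =>
      constructor
      · intro _ j h1 h2; exact absurd h2 (by omega)
      · intro _; exact_mod_cast runN_pos L (r + 1)
    | (m' + 2) =>
      have hsplit : allA L (r + 1 - m') (r + 1) ↔ allA L (r + 1 - m') r ∧ adjB L (r + 1) = true := by
        constructor
        · intro h; exact ⟨fun j h1 h2 => h j h1 (by omega), h (r + 1) (by omega) le_rfl⟩
        · rintro ⟨h, ha⟩ j h1 h2
          rcases Nat.lt_or_ge j (r + 1) with hj | hj
          · exact h j h1 (by omega)
          · have : j = r + 1 := by omega
            simpa [this] using ha
      have hidx : r + 1 + 2 - (m' + 2) = r + 1 - m' := by omega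
      rw [hidx, hsplit]
      have ihm := ih (m' + 1) (by omega)
      have hidx2 : r + 2 - (m' + 1) = r + 1 - m' := by omega
      rw [hidx2] at ihm
      simp only [runN]
      by_cases ha : adjB L (r + 1) = true
      · rw [if_pos ha]
        constructor
        · intro h; exact ⟨ihm.mp (by push_cast at h ⊢; omega), ha⟩
        · rintro ⟨h, _⟩; have := ihm.mpr h; push_cast at this ⊢; omega
      · rw [if_neg ha]
        constructor
        · intro h; exfalso; push_cast at h; omega
        · rintro ⟨_, h⟩; exact absurd h ha

-- pointwise bridge: A's emitted value = B's emitted value, for every window start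
theorem outW_eq (L : List Int) (K left : Nat) (hK : 2 ≤ K) :
    outW L K left = if (K : Int) ≤ runN L (left + K - 1) then L.getD (left + K - 1) 0 else -1 := by
  unfold outW
  refine if_congr ?_ rfl rfl
  rw [wcW_eq_iff L K left hK]
  have h := runN_ge_iff L (left + K - 1) K (by omega)
  rw [show left + K - 1 + 2 - K = left + 1 by omega] at h
  rw [h]

-- window-counter recurrence (what A's slide step computes)
theorem wcW_succ (L : List Int) (K u : Nat) (hK : 2 ≤ K) :
    wcW L K (u + 1) =
      wcW L K u - (if adjB L (u + 1) = true then 1 else 0) + (if adjB L (u + K) = true then 1 else 0) := by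
  unfold wcW
  have hp : ((fun t => adjB L (u + 1 + t)) ∘ Nat.succ) = (fun t => adjB L (u + 2 + t)) := by
    funext t; simp only [Function.comp_apply]; congr 1; omega
  have hq : (fun t => adjB L (u + 1 + 1 + t)) = (fun t => adjB L (u + 2 + t)) := by
    funext t; congr 1
  have h1 : (List.range (K - 1)).countP (fun t => adjB L (u + 1 + t)) =
      (List.range (K - 2)).countP (fun t => adjB L (u + 2 + t))
        + (if adjB L (u + 1) = true then 1 else 0) := by
    rw [show K - 1 = (K - 2) + 1 by omega, List.range_succ_eq_map, List.countP_cons,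
      List.countP_map, hp]
  have h2 : (List.range (K - 1)).countP (fun t => adjB L (u + 1 + 1 + t)) =
      (List.range (K - 2)).countP (fun t => adjB L (u + 2 + t))
        + (if adjB L (u + K) = true then 1 else 0) := by
    rw [show K - 1 = (K - 2) + 1 by omega, List.range_succ, List.countP_append, hq]
    by_cases h : adjB L (u + K) = true <;>
      simp [h, show u + 2 + (K - 2) = u + K by omega]
  rw [h1, h2]
  by_cases h : adjB L (u + 1) = true <;> by_cases h' : adjB L (u + K) = true <;>
    simp [h, h'] <;> omega

theorem portA_eq (L : List Int) (K : Nat) (hK : 2 ≤ K) (hN : K ≤ L.length) :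
    resultsArray L (K : Int) = (List.range (L.length - K + 1)).map (outW L K) := by
  have hne : ¬((K : Int) = 1) := by omega
  simp only [resultsArray, if_neg hne]
  -- first fold computes wcW L K 0
  have e1 : (PySem.List.pyRange 1 (K : Int) 1).foldl
      (fun wc i => if PySem.List.pyGetD L i 0 = PySem.List.pyGetD L (i - 1) 0 + 1 then wc + 1 else wc) 1
      = wcW L K 0 := by
    rw [PySem.List.pyRange_one, List.foldl_map, show ((K : Int) - 1).toNat = K - 1 by omega]
    have e : (fun (wc : Int) (t : Nat) =>
        if PySem.List.pyGetD L (1 + (t : Int)) 0 = PySem.List.pyGetD L (1 + (t : Int) - 1) 0 + 1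
        then wc + 1 else wc)
        = (fun (wc : Int) (t : Nat) => if (fun t => adjB L (0 + 1 + t)) t = true then wc + 1 else wc) := by
      funext wc t
      rw [show (1 + (t : Int)) = ((t + 1 : Nat) : Int) by push_cast; ring]
      rw [show ((t + 1 : Nat) : Int) - 1 = ((t : Nat) : Int) by push_cast; ring]
      simp only [PySem.List.pyGetD_natCast, adjB, show 0 + 1 + t = t + 1 by omega,
        show t + 1 - 1 = t by omega, beq_iff_eq]
    rw [e, PySem.List.foldl_count_if]
    simp [wcW]
  rw [e1]
  have eAns : (if wcW L K 0 = (K : Int) then [PySem.List.pyGetD L ((K : Int) - 1) 0] else [-1])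
      = [outW L K 0] := by
    rw [show ((K : Int) - 1) = ((K - 1 : Nat) : Int) by omega, PySem.List.pyGetD_natCast]
    unfold outW
    rw [show 0 + K - 1 = K - 1 by omega]
    split <;> simp [List.getD]
  rw [eAns]
  rw [PySem.List.pyRange_one, List.foldl_map,
    show ((L.length : Int) - (K : Int) + 1 - 1).toNat = L.length - K by omega]
  have h0 : ([outW L K 0], wcW L K 0)
      = ([outW L K 0] ++ (List.range 0).map (fun u => outW L K (u + 1)), wcW L K 0) := by simp
  rw [h0]
  rw [foldl_fix _ (fun t => ([outW L K 0] ++ (List.range t).map (fun u => outW L K (u + 1)), wcW L K t))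
      (L.length - K) ?_]
  · rw [show L.length - K + 1 = (L.length - K) + 1 from rfl, List.range_succ_eq_map,
      List.map_cons, List.map_map]
    simp [Function.comp, Nat.succ_eq_add_one]
  · intro u _
    dsimp only
    rw [show (1 + (u : Int)) = ((u + 1 : Nat) : Int) by push_cast; ring]
    rw [show ((u + 1 : Nat) : Int) - 1 = ((u : Nat) : Int) by push_cast; ring]
    rw [show ((u + 1 : Nat) : Int) + (K : Int) - 1 = ((u + K : Nat) : Int) by push_cast; ring]
    rw [show ((u + K : Nat) : Int) - 1 = ((u + K - 1 : Nat) : Int) by omega]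
    simp only [PySem.List.pyGetD_natCast]
    have c1 : (L.getD (u + 1) 0 = L.getD u 0 + 1) ↔ adjB L (u + 1) = true := by
      simp [adjB, show u + 1 - 1 = u by omega]
    have c2 : (L.getD (u + K) 0 = L.getD (u + K - 1) 0 + 1) ↔ adjB L (u + K) = true := by
      simp [adjB]
    have hwc2 : (if L.getD (u + K) 0 = L.getD (u + K - 1) 0 + 1
        then (if L.getD (u + 1) 0 = L.getD u 0 + 1 then wcW L K u - 1 else wcW L K u) + 1
        else (if L.getD (u + 1) 0 = L.getD u 0 + 1 then wcW L K u - 1 else wcW L K u))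
        = wcW L K (u + 1) := by
      simp only [c1, c2]
      rw [wcW_succ L K u hK]
      by_cases h1 : adjB L (u + 1) = true <;> by_cases h2 : adjB L (u + K) = true <;>
        simp [h1, h2]
    rw [hwc2]
    have hout : (if wcW L K (u + 1) = (K : Int) then L.getD (u + K) 0 else -1) = outW L K (u + 1) := by
      unfold outW
      rw [show u + 1 + K - 1 = u + K by omega]
    rw [hout]
    rw [List.range_succ, List.map_append, List.map_cons, List.map_nil, List.append_assoc]

theorem portB_eq (L : List Int) (K : Nat) (hK : 2 ≤ K) (hN : K ≤ L.length) :
    resultsArray_alt L (K : Int) = (List.range (L.length - K + 1)).map (outW L K) := by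
  have hne : ¬((K : Int) = 1) := by omega
  simp only [resultsArray_alt, if_neg hne]
  have eInit : List.replicate L.length (1 : Int)
      = (List.range L.length).map (fun j => if j ≤ 0 then runN L j else 1) := by
    apply List.ext_getElem (by simp)
    intro i h1 h2
    simp only [List.getElem_replicate, List.getElem_map, List.getElem_range]
    by_cases hi : i ≤ 0
    · rw [if_pos hi, show i = 0 by omega]; simp [runN]
    · rw [if_neg hi]
  rw [eInit]
  rw [PySem.List.pyRange_one (a := 1) (b := (L.length : Int)), List.foldl_map,
    show ((L.length : Int) - 1).toNat = L.length - 1 by omega]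
  rw [foldl_fix _ (fun t => (List.range L.length).map (fun j => if j ≤ t then runN L j else 1))
      (L.length - 1) ?_]
  · -- emit first window, then extend over window ends r = k .. n-1
    rw [PySem.List.foldl_append_singleton_eq_map]
    rw [PySem.List.pyRange_one (a := (K : Int)), show ((L.length : Int) - (K : Int)).toNat = L.length - K by omega,
      List.map_map]
    rw [show L.length - K + 1 = (L.length - K) + 1 from rfl, List.range_succ_eq_map, List.map_cons,
      List.map_map]
    rw [List.singleton_append]
    congr 1
    · rw [show ((K : Int) - 1) = ((K - 1 : Nat) : Int) by omega]
      simp only [PySem.List.pyGetD_natCast]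
      rw [PySem.List.getD_map_range _ _ _ _ (by omega),
        if_pos (show K - 1 ≤ L.length - 1 by omega)]
      rw [outW_eq L K 0 hK, show 0 + K - 1 = K - 1 by omega]
    · apply List.map_congr_left
      intro t ht
      rw [List.mem_range] at ht
      simp only [Function.comp_apply]
      rw [show ((K : Int) + (t : Int)) = ((K + t : Nat) : Int) by push_cast; ring]
      simp only [PySem.List.pyGetD_natCast]
      rw [PySem.List.getD_map_range _ _ _ _ (by omega),
        if_pos (show K + t ≤ L.length - 1 by omega)]
      rw [show outW L K t.succ = outW L K (t + 1) from rfl, outW_eq L K (t + 1) hK,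
        show t + 1 + K - 1 = K + t by omega]
  · intro u hu
    dsimp only
    rw [show (1 + (u : Int)) = ((u + 1 : Nat) : Int) by push_cast; ring]
    rw [show ((u + 1 : Nat) : Int) - 1 = ((u : Nat) : Int) by push_cast; ring]
    simp only [PySem.List.pyGetD_natCast, PySem.List.pySetD_natCast]
    have hgd : (List.map (fun j => if j ≤ u then runN L j else 1) (List.range L.length)).getD u 0
        = runN L u := by
      rw [PySem.List.getD_map_range _ _ _ _ (by omega)]
      rw [if_pos le_rfl]
    by_cases ha : adjB L (u + 1) = true
    · rw [if_pos (by simpa [adjB, beq_iff_eq, show u + 1 - 1 = u by omega] using ha)]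
      rw [hgd]
      apply List.ext_getElem (by simp)
      intro i h1 h2
      simp only [List.getElem_set, List.getElem_map, List.getElem_range] at h1 h2 ⊢
      by_cases hi : u + 1 = i
      · rw [if_pos hi]
        subst hi
        rw [if_pos le_rfl]
        simp [runN, ha]
      · rw [if_neg hi]
        by_cases hiu : i ≤ u
        · rw [if_pos hiu, if_pos (by omega)]
        · rw [if_neg hiu, if_neg (by omega)]
    · rw [if_neg (by simpa [adjB, beq_iff_eq, show u + 1 - 1 = u by omega] using ha)]
      apply List.map_congr_left
      intro j hj
      by_cases hj1 : j ≤ u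
      · rw [if_pos hj1, if_pos (by omega)]
      · by_cases hj2 : j ≤ u + 1
        · rw [if_neg hj1, if_pos hj2, show j = u + 1 by omega]
          simp [runN, ha]
        · rw [if_neg hj1, if_neg hj2]

-- ===== VERDICT (by name: the statement is the Claim_ definition above) =====
theorem resultsArray_spec : Claim_equal_resultsArray := by
  intro nums k _ hpre
  unfold Spec_resultsArray
  rcases hpre with h1 | ⟨h2, h3⟩
  · subst h1; simp [resultsArray, resultsArray_alt]
  · obtain ⟨K, rfl⟩ : ∃ K : Nat, k = (K : Int) := ⟨k.toNat, by omega⟩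
    have hK : 2 ≤ K := by omega
    have hN : K ≤ nums.length := by omega
    rw [portA_eq nums K hK hN, portB_eq nums K hK hN]
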